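-- pv_equiv track=rewrite | github.com/KazukiOnodera/Toxic-Comment | ikki/src/fasttext_capsule6.py | make_asterisk_toxic_word
-- ===== SOURCE A (Python) =====
-- import itertools
-- from collections import Counter
--
-- def make_asterisk_toxic_word(toxic_word):
--     split_word = list(toxic_word)
--     product_set = [[split_char, '*'] if split_char != ' ' else [split_char] for split_char in split_word]
--     asterisk_word = list(itertools.product(*product_set))
--     asterisk_word_list = list(map(lambda x: ''.join(x), asterisk_word))
--     # remove original word
--     asterisk_word_list.remove(toxic_word)
--     # remove all asterisk word
--     asterisk_word_list = [word for word in asterisk_word_list if len(Counter(''.join(word.split())).values()) != 1]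
--     return asterisk_word_list
-- ===== SOURCE B (Python) =====
-- def make_asterisk_toxic_word(toxic_word):
--     # Generate the variants by recursion over the character list instead of
--     # itertools.product: real char first, then '*' (rightmost position varies
--     # fastest), so the order matches product exactly; the first variant is the
--     # original word itself, so it is dropped with [1:].
--     def gen(chars):
--         if not chars:
--             return [[]]
--         c, rest = chars[0], chars[1:]
--         tails = gen(rest)
--         out = [[c] + t for t in tails]
--         if c != ' ':
--             out += [['*'] + t for t in tails]
--         return out
--     variants = [''.join(t) for t in gen(list(toxic_word))[1:]]
--     return [w for w in variants if len(set(''.join(w.split()))) != 1]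
-- ===== Notes on version B (the rewrite author's own statement) =====
-- stated objective: alternative
-- what changed: Replaces itertools.product + join + list.remove + Counter-based filter with a direct recursion over the character list that emits each variant's character list (real char before '*', rightmost fastest), drops the original word as the known head of the list, and filters with len(set(...)) != 1 instead of Counter values.
import Mathlib
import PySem

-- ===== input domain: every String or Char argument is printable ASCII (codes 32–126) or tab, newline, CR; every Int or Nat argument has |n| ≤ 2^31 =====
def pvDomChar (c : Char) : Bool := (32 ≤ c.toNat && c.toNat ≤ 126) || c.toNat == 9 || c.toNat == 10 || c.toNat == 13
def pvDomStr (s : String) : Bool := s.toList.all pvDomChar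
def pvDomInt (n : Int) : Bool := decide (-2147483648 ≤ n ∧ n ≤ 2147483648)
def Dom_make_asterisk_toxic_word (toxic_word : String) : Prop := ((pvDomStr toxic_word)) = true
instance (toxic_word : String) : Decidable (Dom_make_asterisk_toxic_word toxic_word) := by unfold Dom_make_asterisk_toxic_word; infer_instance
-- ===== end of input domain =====

-- B generates the variants by direct recursion over the character list (real char before '*',
-- rightmost position varying fastest) and drops the original word as the known head, replacing
-- itertools.product + list.remove + the Counter-based filter; same asymptotic cost (alternative).

-- ===== PORT A =====
-- itertools.product(*lists): first factor varies slowest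
def pyProduct : List (List Char) → List (List Char)
  | [] => [[]]
  | l :: ls => l.flatMap (fun x => (pyProduct ls).map (fun t => x :: t))

def make_asterisk_toxic_word (toxic_word : String) : List String :=
  let split_word := toxic_word.toList
  let product_set := split_word.map (fun c => if c ≠ ' ' then [c, '*'] else [c])
  let asterisk_word := pyProduct product_set
  -- ''.join over a tuple of single chars = String.ofList (exact)
  let asterisk_word_list := asterisk_word.map (fun x => String.ofList x)
  match PySem.List.remove? asterisk_word_list toxic_word with
  | some l => l.filter (fun word =>
      (PySem.Dict.counter (PySem.Str.join "" (PySem.Str.split₀ word)).toList).values.length != 1)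
  | none => []   -- ValueError; unreachable: the all-original-chars tuple is always produced

-- ===== PORT B =====
def genVariants : List Char → List (List Char)
  | [] => [[]]
  | c :: rest =>
    let tails := genVariants rest
    let out := tails.map (fun t => c :: t)
    if c ≠ ' ' then out ++ tails.map (fun t => '*' :: t) else out

def make_asterisk_toxic_word_alt (toxic_word : String) : List String :=
  -- gen(list(toxic_word))[1:], each variant joined to a string
  let variants := ((genVariants toxic_word.toList).drop 1).map (fun t => String.ofList t)
  variants.filter (fun w =>
    (PySem.Set.ofList (PySem.Str.join "" (PySem.Str.split₀ w)).toList).length != 1)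

-- ===== PRECONDITION & SPEC =====
def Spec_make_asterisk_toxic_word (toxic_word : String) (out : List String) : Prop := out = make_asterisk_toxic_word_alt toxic_word
instance (toxic_word : String) (out : List String) : Decidable (Spec_make_asterisk_toxic_word toxic_word out) := by unfold Spec_make_asterisk_toxic_word; infer_instance

-- ===== CLAIM (what is proved, stated in full; the proofs are below) =====
def Claim_equal_make_asterisk_toxic_word : Prop := ∀ (toxic_word : String), Dom_make_asterisk_toxic_word toxic_word → Spec_make_asterisk_toxic_word toxic_word (make_asterisk_toxic_word toxic_word)

-- ===== LEMMAS AND PROOFS =====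

-- A's product over the choice lists is exactly B's recursive generator
theorem pyProduct_eq_genVariants (xs : List Char) :
    pyProduct (xs.map (fun c => if c ≠ ' ' then [c, '*'] else [c])) = genVariants xs := by
  induction xs with
  | nil => rfl
  | cons c rest ih =>
    have ih' : pyProduct (rest.map (fun c => if c = ' ' then [c] else [c, '*'])) = genVariants rest := by
      simpa only [ne_eq, ite_not] using ih
    by_cases h : c = ' ' <;>
      simp [pyProduct, genVariants, h, ih']

-- the first variant produced is the original character list
theorem genVariants_head (xs : List Char) : ∃ ts, genVariants xs = xs :: ts := by
  induction xs with
  | nil => exact ⟨[], rfl⟩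
  | cons c rest ih =>
    obtain ⟨ts, h⟩ := ih
    by_cases hc : c = ' '
    · exact ⟨ts.map (fun t => c :: t), by simp [genVariants, hc, h]⟩
    · exact ⟨ts.map (fun t => c :: t) ++ (genVariants rest).map (fun t => '*' :: t),
        by simp [genVariants, hc, h]⟩

-- number of distinct Counter values-entries = size of the char set
theorem counter_values_length_eq_set (l : List Char) :
    (PySem.Dict.counter l (κ := Char)).values.length = (PySem.Set.ofList l).length := by
  have h : (PySem.Dict.counter l (κ := Char)).values.length
      = (PySem.Dict.counter l (κ := Char)).keys.length := by
    simp [PySem.Dict.values, PySem.Dict.keys]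
  rw [h, PySem.Dict.keys_counter]

-- ===== VERDICT (by name: the statement is the Claim_ definition above) =====
theorem make_asterisk_toxic_word_spec : Claim_equal_make_asterisk_toxic_word := by
  intro tw _
  obtain ⟨ts, hg⟩ := genVariants_head tw.toList
  simp only [Spec_make_asterisk_toxic_word, make_asterisk_toxic_word,
    make_asterisk_toxic_word_alt]
  rw [pyProduct_eq_genVariants, hg]
  simp only [List.map_cons, List.drop_succ_cons, List.drop_zero, String.ofList_toList,
    PySem.List.remove?_cons_self]
  exact List.filter_congr fun w _ => by rw [counter_values_length_eq_set]
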